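-- pv_equiv track=rewrite | github.com/talishna/SNS_transmon | delta_energy_plots.py | format_energy_labels
-- ===== SOURCE A (Python) =====
-- def format_energy_labels(labels):
--     """
--     Replaces energy level notations (E0, E1, E2, E3) with their LaTeX equivalents.
--
--     Parameters:
--         labels (list of str): List of energy difference labels.
--
--     Returns:
--         list of str: Formatted labels with LaTeX notation.
--     """
--     mapping = {
--         'E0': r'${\left| 0,- \right\rangle}$',
--         'E1': r'${\left| 0,+ \right\rangle}$',
--         'E2': r'${\left| 1,- \right\rangle}$',
--         'E3': r'${\left| 1,+ \right\rangle}$'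
--     }
--
--     formatted_labels = []
--     for label in labels:
--         for key, value in mapping.items():
--             label = label.replace(key, value)
--         formatted_labels.append(label)
--
--     return formatted_labels
-- ===== SOURCE B (Python) =====
-- import re
--
-- _MAPPING = {
--     'E0': r'${\left| 0,- \right\rangle}$',
--     'E1': r'${\left| 0,+ \right\rangle}$',
--     'E2': r'${\left| 1,- \right\rangle}$',
--     'E3': r'${\left| 1,+ \right\rangle}$',
-- }
--
-- _PAT = re.compile(r'E[0-3]')
--
--
-- def format_energy_labels(labels):
--     """Replace E0..E3 with their LaTeX kets in one left-to-right regex pass per label."""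
--     return [_PAT.sub(lambda m: _MAPPING[m.group()], label) for label in labels]
-- ===== Notes on version B (the rewrite author's own statement) =====
-- stated objective: idiomatic
-- what changed: B replaces the four sequential whole-string str.replace passes per label with a single left-to-right regex scan (re.sub on E[0-3] with a dict lookup per match), collecting results with a list comprehension.
import Mathlib
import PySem

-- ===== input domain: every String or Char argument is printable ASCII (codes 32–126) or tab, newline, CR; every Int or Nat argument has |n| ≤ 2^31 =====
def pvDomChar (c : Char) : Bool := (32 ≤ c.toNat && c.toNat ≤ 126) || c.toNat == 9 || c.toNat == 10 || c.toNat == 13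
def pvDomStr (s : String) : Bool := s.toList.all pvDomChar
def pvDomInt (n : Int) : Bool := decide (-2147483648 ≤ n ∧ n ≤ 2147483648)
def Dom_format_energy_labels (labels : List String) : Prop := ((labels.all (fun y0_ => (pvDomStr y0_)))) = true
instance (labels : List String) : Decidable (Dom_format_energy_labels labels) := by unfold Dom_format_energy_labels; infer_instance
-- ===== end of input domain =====

-- B replaces A's four sequential whole-string replace passes per label by a single
-- left-to-right scan (a hand port of re.sub on the pattern E[0-3]); return values proved equal.


-- ===== PORT A =====
-- the four LaTeX replacement strings of A's dict literal
def pvRep0 : String := "${\\left| 0,- \\right\\rangle}$"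
def pvRep1 : String := "${\\left| 0,+ \\right\\rangle}$"
def pvRep2 : String := "${\\left| 1,- \\right\\rangle}$"
def pvRep3 : String := "${\\left| 1,+ \\right\\rangle}$"

def pvMapping : PySem.Dict String String :=
  PySem.Dict.ofList [("E0", pvRep0), ("E1", pvRep1), ("E2", pvRep2), ("E3", pvRep3)]

-- A: for each label, loop over the dict items, label = label.replace(key, value); append
def format_energy_labels (labels : List String) : List String :=
  labels.foldl (fun formatted label =>
    formatted ++ [pvMapping.items.foldl (fun lab kv => PySem.Str.replace lab kv.1 kv.2) label]) []

-- ===== PORT B =====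
-- B's replacement strings, spelled as their character lists (same strings; proved equal below)
def pvR0 : List Char := ['$','{','\\','l','e','f','t','|',' ','0',',','-',' ','\\','r','i','g','h','t','\\','r','a','n','g','l','e','}','$']
def pvR1 : List Char := ['$','{','\\','l','e','f','t','|',' ','0',',','+',' ','\\','r','i','g','h','t','\\','r','a','n','g','l','e','}','$']
def pvR2 : List Char := ['$','{','\\','l','e','f','t','|',' ','1',',','-',' ','\\','r','i','g','h','t','\\','r','a','n','g','l','e','}','$']
def pvR3 : List Char := ['$','{','\\','l','e','f','t','|',' ','1',',','+',' ','\\','r','i','g','h','t','\\','r','a','n','g','l','e','}','$']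

-- the regex-match → replacement lookup (mapping[m.group()] keyed by the matched digit)
def pvMapR (d : Char) : List Char :=
  if d = '0' then pvR0
  else if d = '1' then pvR1
  else if d = '2' then pvR2
  else pvR3

-- hand port of re.sub with pattern E[0-3] (exact for this pattern): one left-to-right scan,
-- at each position match 'E' followed by a digit in 0..3, replace and skip both, else copy one char
def pvSubE : List Char → List Char
  | [] => []
  | c :: t =>
    match t with
    | [] => [c]
    | d :: t' =>
      if c = 'E' ∧ ('0' ≤ d ∧ d ≤ '3') then pvMapR d ++ pvSubE t' else c :: pvSubE (d :: t')
termination_by l => l.length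
decreasing_by all_goals simp

def format_energy_labels_alt (labels : List String) : List String :=
  labels.map (fun label => String.ofList (pvSubE label.toList))

-- ===== PRECONDITION & SPEC =====
def Spec_format_energy_labels (labels : List String) (out : List String) : Prop := out = format_energy_labels_alt labels
instance (labels : List String) (out : List String) : Decidable (Spec_format_energy_labels labels out) := by unfold Spec_format_energy_labels; infer_instance

-- ===== CLAIM (what is proved, stated in full; the proofs are below) =====
def Claim_equal_format_energy_labels : Prop := ∀ (labels : List String), Dom_format_energy_labels labels → Spec_format_energy_labels labels (format_energy_labels labels)

-- ===== LEMMAS AND PROOFS =====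

-- a "good" digit: one the pattern E[0-3] matches
def pvGood (d : Char) : Bool := decide ('0' ≤ d ∧ d ≤ '3')

-- proof-side generalised scanner: replaces E<d> for every d in S in one pass;
-- the Bool state records a pending unmatched 'E'
def pvScan (S : List Char) : Bool → List Char → List Char
  | pend, [] => if pend then ['E'] else []
  | true, c :: t =>
    if pvGood c then
      (if c ∈ S then pvMapR c ++ pvScan S false t else 'E' :: c :: pvScan S false t)
    else 'E' :: (if c = 'E' then pvScan S true t else c :: pvScan S false t)
  | false, c :: t => if c = 'E' then pvScan S true t else c :: pvScan S false t

lemma pvScan_false_cons (S : List Char) (c : Char) (t : List Char) :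
    pvScan S false (c :: t) = if c = 'E' then pvScan S true t else c :: pvScan S false t := rfl

lemma pvScan_true_not_good (S : List Char) {c : Char} (t : List Char) (h : pvGood c = false) :
    pvScan S true (c :: t) = 'E' :: pvScan S false (c :: t) := by
  simp [pvScan, h]

lemma pvMapR_head (d : Char) : ∃ r, pvMapR d = '$' :: r := by
  unfold pvMapR pvR0 pvR1 pvR2 pvR3; split_ifs <;> exact ⟨_, rfl⟩

lemma pvMapR_noE (d : Char) : ∀ c ∈ pvMapR d, c ≠ 'E' := by
  unfold pvMapR; split_ifs <;> (intro c hc; fin_cases hc <;> decide)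

lemma pvScan_true_head (S : List Char) (t : List Char) {c : Char} {r : List Char}
    (h : pvScan S true t = c :: r) : pvGood c = false := by
  match t with
  | [] =>
    have h' : ('E' : Char) :: ([] : List Char) = c :: r := by simpa [pvScan] using h
    injection h' with h1 _
    rw [← h1]; decide
  | x :: t' =>
    by_cases hg : pvGood x
    · by_cases hS : x ∈ S
      · obtain ⟨r0, hr0⟩ := pvMapR_head x
        rw [show pvScan S true (x :: t') = pvMapR x ++ pvScan S false t' from by
          simp [pvScan, hg, hS], hr0] at h
        injection h with h1 _
        rw [← h1]; decide
      · rw [show pvScan S true (x :: t') = 'E' :: x :: pvScan S false t' from by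
          simp [pvScan, hg, hS]] at h
        injection h with h1 _
        rw [← h1]; decide
    · rw [pvScan_true_not_good S _ (by simpa using hg)] at h
      injection h with h1 _
      rw [← h1]; decide

-- a pending 'E' whose next char does not complete a match is emitted as a plain 'E'
lemma pvScan_pendE (S : List Char) (t : List Char)
    (h : ∀ c ∈ t.head?, pvGood c = true → c ∉ S) :
    pvScan S true t = 'E' :: pvScan S false t := by
  match t with
  | [] => rfl
  | c :: t' =>
    by_cases hg : pvGood c
    · have hS : c ∉ S := h c (by simp) hg
      have hcE : c ≠ 'E' := by
        intro he; subst he; simp [pvGood] at hg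
      simp [pvScan, hg, hS, hcE]
    · exact pvScan_true_not_good S t' (by simpa using hg)

-- chars other than 'E' pass through the non-pending scanner
lemma pvScan_noE_append (S : List Char) (u v : List Char) (h : ∀ c ∈ u, c ≠ 'E') :
    pvScan S false (u ++ v) = u ++ pvScan S false v := by
  induction u with
  | nil => rfl
  | cons c u ih =>
    have hc : c ≠ 'E' := h c (by simp)
    simp only [List.cons_append, pvScan_false_cons, if_neg hc]
    rw [ih (fun x hx => h x (by simp [hx]))]

-- A's replace with pattern "E<d>" is the singleton scan
lemma pvGo_eq (d : Char) (hd : pvGood d = true) :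
    ∀ fuel l acc, l.length ≤ fuel →
      PySem.Chars.replace.go ['E', d] (pvMapR d) fuel l acc = acc.reverse ++ pvScan [d] false l := by
  intro fuel
  induction fuel with
  | zero =>
    intro l acc hl
    have : l = [] := List.eq_nil_of_length_eq_zero (Nat.le_zero.mp hl)
    subst this
    simp [PySem.Chars.replace.go, pvScan]
  | succ fuel ih =>
    intro l acc hl
    match l with
    | [] => simp [PySem.Chars.replace.go, pvScan]
    | c :: t =>
      rw [PySem.Chars.replace.go]
      by_cases hp : ['E', d].isPrefixOf (c :: t) = true
      · rw [if_pos hp]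
        match t, hp with
        | [], hp => simp [List.isPrefixOf] at hp
        | x :: t2, hp =>
          simp [List.isPrefixOf] at hp
          obtain ⟨hcE, hxd⟩ := hp
          subst hcE; subst hxd
          have hdrop : List.drop (['E', d].length) ('E' :: d :: t2) = t2 := rfl
          rw [hdrop]
          have ht2 : t2.length ≤ fuel := by simp at hl; omega
          rw [ih t2 _ ht2]
          simp [pvScan, hd]
      · rw [if_neg hp]
        have ht : t.length ≤ fuel := by simp at hl; omega
        rw [ih t _ ht]
        have hstep : pvScan [d] false (c :: t) = c :: pvScan [d] false t := by
          rw [pvScan_false_cons]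
          by_cases hcE : c = 'E'
          · subst hcE
            rw [if_pos rfl]
            rw [pvScan_pendE]
            intro x hx hgx hxS
            simp at hxS; subst hxS
            apply hp
            match t, hx with
            | y :: t', hx =>
              simp at hx; subst hx
              simp [List.isPrefixOf]
          · rw [if_neg hcE]
        rw [hstep]; simp

lemma pvReplace_eq (d : Char) (hd : pvGood d = true) (l : List Char) :
    PySem.Chars.replace l ['E', d] (pvMapR d) = pvScan [d] false l := by
  rw [PySem.Chars.replace]
  simp only [List.isEmpty_cons, if_neg (by decide : ¬ (false = true))]
  exact pvGo_eq d hd l.length l [] le_rfl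

-- fusion: scanning for T then for S is scanning for S ∪ T
lemma pvScan_fuse (S T U : List Char) (hU : ∀ x : Char, x ∈ U ↔ x ∈ S ∨ x ∈ T) :
    ∀ n (l : List Char), l.length ≤ n → pvScan S false (pvScan T false l) = pvScan U false l := by
  intro n
  induction n with
  | zero =>
    intro l hl
    have : l = [] := List.eq_nil_of_length_eq_zero (Nat.le_zero.mp hl)
    subst this; rfl
  | succ n ih =>
    intro l hl
    match l with
    | [] => rfl
    | c :: t =>
      by_cases hcE : c = 'E'
      · subst hcE
        match t with
        | [] => rfl
        | x :: t' =>
          by_cases hg : pvGood x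
          · by_cases hT : x ∈ T
            · have h1 : pvScan T false ('E' :: x :: t') = pvMapR x ++ pvScan T false t' := by
                simp [pvScan, hg, hT]
              rw [h1, pvScan_noE_append S _ _ (pvMapR_noE x)]
              rw [ih t' (by simp at hl; omega)]
              simp [pvScan, hg, (hU x).mpr (Or.inr hT)]
            · have h1 : pvScan T false ('E' :: x :: t') = 'E' :: x :: pvScan T false t' := by
                simp [pvScan, hg, hT]
              rw [h1, pvScan_false_cons, if_pos rfl]
              by_cases hS : x ∈ S
              · rw [show pvScan S true (x :: pvScan T false t') =
                    pvMapR x ++ pvScan S false (pvScan T false t') from by simp [pvScan, hg, hS]]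
                rw [ih t' (by simp at hl; omega)]
                simp [pvScan, hg, (hU x).mpr (Or.inl hS)]
              · rw [show pvScan S true (x :: pvScan T false t') =
                    'E' :: x :: pvScan S false (pvScan T false t') from by simp [pvScan, hg, hS]]
                rw [ih t' (by simp at hl; omega)]
                have hxU : x ∉ U := by
                  intro hx; rcases (hU x).mp hx with h | h
                  exacts [hS h, hT h]
                simp [pvScan, hg, hxU]
          · -- x does not complete a match
            have h1 : pvScan T false ('E' :: x :: t') = 'E' :: pvScan T false (x :: t') := by
              rw [pvScan_false_cons, if_pos rfl, pvScan_pendE]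
              intro y hy hgy _
              simp at hy; subst hy
              exact absurd hgy (by simpa using hg)
            rw [h1, pvScan_false_cons, if_pos rfl]
            have hhead : ∀ c ∈ (pvScan T false (x :: t')).head?, pvGood c = true → c ∉ S := by
              intro y hy hgy
              exfalso
              rw [pvScan_false_cons] at hy
              by_cases hxE : x = 'E'
              · subst hxE
                rw [if_pos rfl] at hy
                match hw : pvScan T true t', hy with
                | [], hy => simp at hy
                | z :: r, hy =>
                  simp at hy; subst hy
                  rw [pvScan_true_head T t' hw] at hgy; cases hgy
              · rw [if_neg hxE] at hy
                simp at hy; subst hy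
                exact hg hgy
            rw [pvScan_pendE S _ hhead]
            rw [ih (x :: t') (by simp at hl ⊢; omega)]
            have h2 : pvScan U false ('E' :: x :: t') = 'E' :: pvScan U false (x :: t') := by
              rw [pvScan_false_cons, if_pos rfl, pvScan_pendE]
              intro y hy hgy _
              simp at hy; subst hy
              exact absurd hgy (by simpa using hg)
            rw [h2]
      · have h1 : pvScan T false (c :: t) = c :: pvScan T false t := by
          rw [pvScan_false_cons, if_neg hcE]
        rw [h1, pvScan_false_cons, if_neg hcE, pvScan_false_cons, if_neg hcE]
        rw [ih t (by simp at hl; omega)]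

-- the regex character class E[0-3]: '0' ≤ d ≤ '3' means d is one of the four digits
lemma pvGood_iff (d : Char) : pvGood d = true ↔ d ∈ ['0', '1', '2', '3'] := by
  constructor
  · intro h
    simp only [pvGood, decide_eq_true_eq, Char.le_def] at h
    obtain ⟨h1, h2⟩ := h
    have n1 : 48 ≤ d.val.toNat := UInt32.le_iff_toNat_le.mp h1
    have n2 : d.val.toNat ≤ 51 := UInt32.le_iff_toNat_le.mp h2
    have hd : d.val.toNat = 48 ∨ d.val.toNat = 49 ∨ d.val.toNat = 50 ∨ d.val.toNat = 51 := by
      omega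
    simp only [List.mem_cons, List.not_mem_nil, or_false]
    rcases hd with h | h | h | h
    · exact Or.inl (Char.ext (UInt32.toNat_inj.mp (h.trans rfl)))
    · exact Or.inr (Or.inl (Char.ext (UInt32.toNat_inj.mp (h.trans rfl))))
    · exact Or.inr (Or.inr (Or.inl (Char.ext (UInt32.toNat_inj.mp (h.trans rfl)))))
    · exact Or.inr (Or.inr (Or.inr (Char.ext (UInt32.toNat_inj.mp (h.trans rfl)))))
  · intro h
    simp only [List.mem_cons, List.not_mem_nil, or_false] at h
    rcases h with h | h | h | h <;> subst h <;> decide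

-- B's single-pass scanner is the full-set scan
lemma pvSubE_eq_scan : ∀ n (l : List Char), l.length ≤ n →
    pvSubE l = pvScan ['0', '1', '2', '3'] false l := by
  intro n
  induction n with
  | zero =>
    intro l hl
    have : l = [] := List.eq_nil_of_length_eq_zero (Nat.le_zero.mp hl)
    subst this; simp [pvSubE, pvScan]
  | succ n ih =>
    intro l hl
    match l with
    | [] => simp [pvSubE, pvScan]
    | [c] =>
      rw [show pvSubE [c] = [c] from by simp [pvSubE], pvScan_false_cons]
      by_cases hcE : c = 'E'
      · subst hcE; rw [if_pos rfl]; rfl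
      · rw [if_neg hcE]; rfl
    | c :: d :: t' =>
      by_cases hm : c = 'E' ∧ ('0' ≤ d ∧ d ≤ '3')
      · obtain ⟨hc, hgood⟩ := hm
        subst hc
        have hgd : pvGood d = true := by simpa [pvGood] using hgood
        have hrhs : pvScan ['0', '1', '2', '3'] false ('E' :: d :: t') =
            pvMapR d ++ pvScan ['0', '1', '2', '3'] false t' := by
          rw [pvScan_false_cons _ 'E' (d :: t'), if_pos rfl]
          simp [pvScan, hgd, (pvGood_iff d).mp hgd]
        rw [show pvSubE ('E' :: d :: t') = pvMapR d ++ pvSubE t' from by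
          simp [pvSubE, hgood]]
        rw [ih t' (by simp at hl; omega), hrhs]
      · rw [show pvSubE (c :: d :: t') = c :: pvSubE (d :: t') from by simp [pvSubE, hm]]
        by_cases hcE : c = 'E'
        · subst hcE
          have hrhs : pvScan ['0', '1', '2', '3'] false ('E' :: d :: t') =
              'E' :: pvScan ['0', '1', '2', '3'] false (d :: t') := by
            rw [pvScan_false_cons _ 'E' (d :: t'), if_pos rfl, pvScan_pendE]
            intro y hy hgy hyS
            simp at hy; subst hy
            exact hm ⟨rfl, by simpa [pvGood] using hgy⟩
          rw [hrhs, ih (d :: t') (by simp at hl ⊢; omega)]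
        · have hrhs : pvScan ['0', '1', '2', '3'] false (c :: d :: t') =
              c :: pvScan ['0', '1', '2', '3'] false (d :: t') := by
            rw [pvScan_false_cons _ c (d :: t'), if_neg hcE]
          rw [hrhs, ih (d :: t') (by simp at hl ⊢; omega)]

-- A's per-label chain of four replaces equals B's single pass
set_option maxHeartbeats 1000000 in
lemma pvLabel_eq (label : String) :
    pvMapping.items.foldl (fun lab kv => PySem.Str.replace lab kv.1 kv.2) label =
    String.ofList (pvSubE label.toList) := by
  have hitems : pvMapping.items = [("E0", pvRep0), ("E1", pvRep1), ("E2", pvRep2), ("E3", pvRep3)] := rfl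
  rw [hitems]
  simp only [List.foldl_cons, List.foldl_nil]
  simp only [PySem.Str.replace]
  refine congrArg String.ofList ?_
  simp only [String.toList_ofList]
  have m0 : pvRep0.toList = pvMapR '0' := by
    rw [show pvRep0 = String.ofList pvR0 from rfl]; simp [pvMapR]
  have m1 : pvRep1.toList = pvMapR '1' := by
    rw [show pvRep1 = String.ofList pvR1 from rfl]; simp [pvMapR]
  have m2 : pvRep2.toList = pvMapR '2' := by
    rw [show pvRep2 = String.ofList pvR2 from rfl]; simp [pvMapR]
  have m3 : pvRep3.toList = pvMapR '3' := by
    rw [show pvRep3 = String.ofList pvR3 from rfl]; simp [pvMapR]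
  have t0 : ("E0" : String).toList = ['E', '0'] := by decide
  have t1 : ("E1" : String).toList = ['E', '1'] := by decide
  have t2 : ("E2" : String).toList = ['E', '2'] := by decide
  have t3 : ("E3" : String).toList = ['E', '3'] := by decide
  rw [t0, t1, t2, t3, m0, m1, m2, m3]
  rw [pvReplace_eq '0' (by decide), pvReplace_eq '1' (by decide),
      pvReplace_eq '2' (by decide), pvReplace_eq '3' (by decide)]
  rw [pvScan_fuse ['1'] ['0'] ['0','1'] (by intro x; simp; tauto) _ _ le_rfl]
  rw [pvScan_fuse ['2'] ['0','1'] ['0','1','2'] (by intro x; simp; tauto) _ _ le_rfl]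
  rw [pvScan_fuse ['3'] ['0','1','2'] ['0','1','2','3'] (by intro x; simp; tauto) _ _ le_rfl]
  rw [pvSubE_eq_scan label.toList.length _ le_rfl]

lemma pvFoldl_append (g : String → String) (labels acc : List String) :
    labels.foldl (fun formatted label => formatted ++ [g label]) acc = acc ++ labels.map g := by
  induction labels generalizing acc with
  | nil => simp
  | cons x xs ih => simp [ih]

-- ===== VERDICT (by name: the statement is the Claim_ definition above) =====
theorem format_energy_labels_spec : Claim_equal_format_energy_labels := by
  intro labels _
  unfold Spec_format_energy_labels format_energy_labels format_energy_labels_alt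
  rw [pvFoldl_append]
  simp only [List.nil_append]
  exact List.map_congr_left fun label _ => pvLabel_eq label
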